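-- pv_equiv track=rewrite | github.com/spruikco/esms | esms/engine/match_engine.py | positions_are_similar
-- ===== SOURCE A (Python) =====
-- def positions_are_similar(pos1, pos2):
--     """Check if two positions are similar enough for substitution"""
--     position_groups = [
--         ['GK'],  # Goalkeepers
--         ['CB', 'LB', 'RB', 'LWB', 'RWB'],  # Defenders
--         ['DM', 'CM', 'LM', 'RM'],  # Midfielders
--         ['AM', 'LW', 'RW'],  # Attacking midfielders/wingers
--         ['ST', 'CF']  # Strikers
--     ]
--
--     for group in position_groups:
--         if pos1 in group and pos2 in group:
--             return True
--
--     return False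
-- ===== SOURCE B (Python) =====
-- _POSITION_GROUPS = [
--     ['GK'],  # Goalkeepers
--     ['CB', 'LB', 'RB', 'LWB', 'RWB'],  # Defenders
--     ['DM', 'CM', 'LM', 'RM'],  # Midfielders
--     ['AM', 'LW', 'RW'],  # Attacking midfielders/wingers
--     ['ST', 'CF']  # Strikers
-- ]
--
-- # position -> group index, built once
-- _POSITION_GROUP_INDEX = {pos: i for i, group in enumerate(_POSITION_GROUPS) for pos in group}
--
--
-- def positions_are_similar(pos1, pos2):
--     """Check if two positions are similar enough for substitution"""
--     g1 = _POSITION_GROUP_INDEX.get(pos1)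
--     return g1 is not None and g1 == _POSITION_GROUP_INDEX.get(pos2)
-- ===== Notes on version B (the rewrite author's own statement) =====
-- stated objective: idiomatic
-- what changed: Replaced the per-call loop over groups with dual membership tests by a module-level dict mapping each position to its group index, built once; the function becomes two lookups and a None-guarded comparison.
import Mathlib
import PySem

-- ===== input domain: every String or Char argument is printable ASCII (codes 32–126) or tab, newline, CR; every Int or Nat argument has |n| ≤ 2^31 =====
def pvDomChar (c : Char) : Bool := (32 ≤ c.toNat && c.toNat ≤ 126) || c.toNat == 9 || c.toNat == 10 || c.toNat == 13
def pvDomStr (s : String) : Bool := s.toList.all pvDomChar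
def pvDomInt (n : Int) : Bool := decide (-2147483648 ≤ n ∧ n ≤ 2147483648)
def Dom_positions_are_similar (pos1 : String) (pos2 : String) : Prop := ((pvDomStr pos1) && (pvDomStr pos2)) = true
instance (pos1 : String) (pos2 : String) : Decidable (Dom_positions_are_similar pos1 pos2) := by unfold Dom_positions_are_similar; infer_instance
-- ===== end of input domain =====

-- B replaces A's per-call loop over groups with a precomputed position→group-index table; objective: idiomatic.

-- ===== PORT A =====
def paGroups : List (List String) :=
  [["GK"], ["CB", "LB", "RB", "LWB", "RWB"], ["DM", "CM", "LM", "RM"],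
   ["AM", "LW", "RW"], ["ST", "CF"]]

-- the 'for group in position_groups' loop with early return
def paLoop (pos1 pos2 : String) : List (List String) → Bool
  | [] => false
  | g :: rest => if g.contains pos1 && g.contains pos2 then true else paLoop pos1 pos2 rest

def positions_are_similar (pos1 : String) (pos2 : String) : Bool :=
  paLoop pos1 pos2 paGroups

-- ===== PORT B =====
-- the dict comprehension {pos: i for i, group in enumerate(groups) for pos in group}
def pbIndexTable : PySem.Dict String Int :=
  (PySem.List.enumerate paGroups).foldl
    (fun d gi => gi.2.foldl (fun d p => d.insert p gi.1) d)
    PySem.Dict.empty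

def positions_are_similar_alt (pos1 : String) (pos2 : String) : Bool :=
  match pbIndexTable.get? pos1 with
  | none => false
  | some g1 => pbIndexTable.get? pos2 == some g1

-- ===== PRECONDITION & SPEC =====
def Spec_positions_are_similar (pos1 : String) (pos2 : String) (out : Bool) : Prop := out = positions_are_similar_alt pos1 pos2
instance (pos1 : String) (pos2 : String) (out : Bool) : Decidable (Spec_positions_are_similar pos1 pos2 out) := by unfold Spec_positions_are_similar; infer_instance

-- ===== CLAIM (what is proved, stated in full; the proofs are below) =====
def Claim_equal_positions_are_similar : Prop := ∀ (pos1 : String) (pos2 : String), Dom_positions_are_similar pos1 pos2 → Spec_positions_are_similar pos1 pos2 (positions_are_similar pos1 pos2)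

-- ===== LEMMAS AND PROOFS =====

-- the table, evaluated to its literal association list
theorem pbIndexTable_eq : pbIndexTable = PySem.Dict.mk
    [("GK", 0), ("CB", 1), ("LB", 1), ("RB", 1), ("LWB", 1), ("RWB", 1),
     ("DM", 2), ("CM", 2), ("LM", 2), ("RM", 2),
     ("AM", 3), ("LW", 3), ("RW", 3), ("ST", 4), ("CF", 4)] := by decide

theorem positions_are_similar_spec : Claim_equal_positions_are_similar := by
  intro pos1 pos2 _
  unfold Spec_positions_are_similar positions_are_similar positions_are_similar_alt
  rw [pbIndexTable_eq]
  by_cases h1 : pos1 ∈ (["GK","CB","LB","RB","LWB","RWB","DM","CM","LM","RM","AM","LW","RW","ST","CF"] : List String)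
  · by_cases h2 : pos2 ∈ (["GK","CB","LB","RB","LWB","RWB","DM","CM","LM","RM","AM","LW","RW","ST","CF"] : List String)
    · fin_cases h1 <;> fin_cases h2 <;> decide
    · simp only [List.mem_cons, not_or] at h2
      obtain ⟨n1,n2,n3,n4,n5,n6,n7,n8,n9,n10,n11,n12,n13,n14,n15⟩ := h2
      fin_cases h1 <;>
        simp [paLoop, paGroups, PySem.Dict.get?,
          n1,n2,n3,n4,n5,n6,n7,n8,n9,n10,n11,n12,n13,n14,n15, Ne.symm]
  · simp only [List.mem_cons, not_or] at h1
    obtain ⟨n1,n2,n3,n4,n5,n6,n7,n8,n9,n10,n11,n12,n13,n14,n15⟩ := h1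
    simp [paLoop, paGroups, PySem.Dict.get?,
      n1,n2,n3,n4,n5,n6,n7,n8,n9,n10,n11,n12,n13,n14,n15, Ne.symm]
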